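-- pv_equiv track=rewrite | github.com/SyrineBenAbderrahmen/PFE_BI_Agent | backend/xmla_generator.py | _resolve_hierarchy_source_attribute_id
-- ===== SOURCE A (Python) =====
-- def _normalize_name(value: str) -> str:
--     return "".join(ch.lower() for ch in (value or "") if ch.isalnum())
--
-- def _available_dimension_attribute_ids(dim: dict) -> dict:
--     """
--     Retourne un mapping normalisé -> vrai ID d'attribut de la dimension.
--     On mappe à la fois le name et le source_column.
--     """
--     aliases = {}
--
--     for attr in dim.get("attributes", []) or []:
--         attr_name = attr.get("name")
--         source_col = attr.get("source_column", attr_name)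
--
--         if attr_name:
--             aliases[_normalize_name(attr_name)] = attr_name
--         if source_col:
--             aliases[_normalize_name(source_col)] = attr_name or source_col
--
--     return aliases
--
-- def _resolve_hierarchy_source_attribute_id(level: dict, dim: dict) -> str | None:
--     """
--     Résout un niveau vers un AttributeID réellement existant dans la dimension.
--     """
--     aliases = _available_dimension_attribute_ids(dim)
--
--     candidates = [
--         level.get("source_attribute_id"),
--         level.get("source_column"),
--         level.get("name"),
--     ]
--
--     for cand in candidates:
--         if not cand:
--             continue
--         resolved = aliases.get(_normalize_name(cand))
--         if resolved:
--             return resolved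
--
--     return None
-- ===== SOURCE B (Python) =====
-- def _normalize_name(value: str) -> str:
--     return "".join(ch.lower() for ch in (value or "") if ch.isalnum())
--
-- def _resolve_hierarchy_source_attribute_id(level: dict, dim: dict) -> str | None:
--     for field in ("source_attribute_id", "source_column", "name"):
--         cand = level.get(field)
--         if not cand:
--             continue
--         key = _normalize_name(cand)
--         for attr in (dim.get("attributes") or []):
--             name = attr.get("name")
--             col = attr.get("source_column", name)
--             if (name and _normalize_name(name) == key) or (col and _normalize_name(col) == key):
--                 return name or col
--     return None
-- ===== Notes on version B (the rewrite author's own statement) =====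
-- stated objective: simpler
-- what changed: B drops the alias-dictionary helper and does a plain first-match scan of the attributes per candidate, returning `name or col` immediately; Pre_ excludes dimensions where two alias slots normalize to the same key with different resolved values, on which A's dict last-writer-wins order is accidental.
-- outside the precondition, e.g. on _resolve_hierarchy_source_attribute_id({'name': 'x'}, {'attributes': [{'name': 'X'}, {'name': 'x '}]}): A returns 'x ', B returns 'X'
import Mathlib
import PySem

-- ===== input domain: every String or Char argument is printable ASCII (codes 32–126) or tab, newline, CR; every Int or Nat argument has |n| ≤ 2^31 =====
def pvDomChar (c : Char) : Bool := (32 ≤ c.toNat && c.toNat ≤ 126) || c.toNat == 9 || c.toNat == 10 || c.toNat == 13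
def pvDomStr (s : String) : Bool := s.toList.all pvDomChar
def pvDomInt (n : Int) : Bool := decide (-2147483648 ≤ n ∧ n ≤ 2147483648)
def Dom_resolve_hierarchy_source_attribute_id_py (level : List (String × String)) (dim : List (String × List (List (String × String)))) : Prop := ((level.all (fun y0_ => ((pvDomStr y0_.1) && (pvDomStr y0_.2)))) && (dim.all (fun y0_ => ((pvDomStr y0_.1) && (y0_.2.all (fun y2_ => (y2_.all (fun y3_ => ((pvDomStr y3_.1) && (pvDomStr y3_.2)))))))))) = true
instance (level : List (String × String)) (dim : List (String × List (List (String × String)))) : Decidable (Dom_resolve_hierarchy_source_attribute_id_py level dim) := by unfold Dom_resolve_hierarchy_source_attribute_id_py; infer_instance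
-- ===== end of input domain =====

-- B replaces A's alias-dictionary helper by a plain first-match scan of the attributes per candidate (objective: simpler — no intermediate dict); Pre_ excludes dims with conflicting normalized alias keys, where A's dict last-writer-wins order is accidental.

-- _normalize_name: keep alnum chars, lowercase each (shared by both Pythons verbatim)
def pvNorm (s : String) : String :=
  String.mk ((s.toList.filter (fun c => PySem.Chars.isalnum c)).map PySem.Chars.lowerChar)

-- Python truthiness of an Optional[str]
def pvTruthy (o : Option String) : Bool := (o.getD "") ≠ ""

-- attr.get("name") and attr.get("source_column", attr_name)
def pvAn (attr : List (String × String)) : Option String := (PySem.Dict.mk attr).get? "name"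
def pvSc (attr : List (String × String)) : Option String :=
  ((PySem.Dict.mk attr).get? "source_column").orElse (fun _ => pvAn attr)

-- dim.get("attributes", []) or []  ('or []' is the identity here since the default is already [])
def pvAttrs (dim : List (String × List (List (String × String)))) : List (List (String × String)) :=
  ((PySem.Dict.mk dim).get? "attributes").getD []

-- ===== PORT A =====
-- one iteration of the alias-building loop in _available_dimension_attribute_ids
def pvAliasStep (al : PySem.Dict String String) (attr : List (String × String)) : PySem.Dict String String :=
  if pvTruthy (pvSc attr) then
    (if pvTruthy (pvAn attr) then al.insert (pvNorm ((pvAn attr).getD "")) ((pvAn attr).getD "") else al).insert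
      (pvNorm ((pvSc attr).getD ""))
      (if pvTruthy (pvAn attr) then (pvAn attr).getD "" else (pvSc attr).getD "")
  else if pvTruthy (pvAn attr) then al.insert (pvNorm ((pvAn attr).getD "")) ((pvAn attr).getD "") else al

def pvAliases (dim : List (String × List (List (String × String)))) : PySem.Dict String String :=
  (pvAttrs dim).foldl pvAliasStep PySem.Dict.empty

-- the candidate loop of A: for cand: if not cand: continue; resolved = aliases.get(norm); if resolved: return
def pvLoopA (al : PySem.Dict String String) : List (Option String) → Option String
  | [] => none
  | c :: rest =>
    if pvTruthy c then
      let r := al.get? (pvNorm (c.getD ""))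
      if pvTruthy r then r else pvLoopA al rest
    else pvLoopA al rest

def resolve_hierarchy_source_attribute_id_py (level : List (String × String)) (dim : List (String × List (List (String × String)))) : Option String :=
  let al := pvAliases dim
  let L := PySem.Dict.mk level
  pvLoopA al [L.get? "source_attribute_id", L.get? "source_column", L.get? "name"]

-- ===== PORT B =====
-- B's inner attribute scan: return `name or col` at the FIRST attribute whose name or source column normalizes to the key
def pvFindB (key : String) : List (List (String × String)) → Option String
  | [] => none
  | attr :: rest =>
    if (pvTruthy (pvAn attr) && (pvNorm ((pvAn attr).getD "") == key))
        || (pvTruthy (pvSc attr) && (pvNorm ((pvSc attr).getD "") == key)) then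
      some (if pvTruthy (pvAn attr) then (pvAn attr).getD "" else (pvSc attr).getD "")
    else pvFindB key rest

-- B's field loop: skip a falsy candidate, otherwise return the first scan hit
def pvLoopB (attrs : List (List (String × String))) (level : List (String × String)) : List String → Option String
  | [] => none
  | f :: fields =>
    let cand := (PySem.Dict.mk level).get? f
    if pvTruthy cand then
      match pvFindB (pvNorm (cand.getD "")) attrs with
      | some v => some v
      | none => pvLoopB attrs level fields
    else pvLoopB attrs level fields

def resolve_hierarchy_source_attribute_id_py_alt (level : List (String × String)) (dim : List (String × List (List (String × String)))) : Option String :=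
  pvLoopB (pvAttrs dim) level ["source_attribute_id", "source_column", "name"]

-- ===== PRECONDITION & SPEC =====
-- the (normalized key, resolved value) pairs a dimension's attributes give rise to (used only by Pre_ and the proofs)
def pvEntriesOf (attr : List (String × String)) : List (String × String) :=
  (if pvTruthy (pvAn attr) then [(pvNorm ((pvAn attr).getD ""), (pvAn attr).getD "")] else []) ++
  (if pvTruthy (pvSc attr) then
      [(pvNorm ((pvSc attr).getD ""), if pvTruthy (pvAn attr) then (pvAn attr).getD "" else (pvSc attr).getD "")]
    else [])

def pvEntries (dim : List (String × List (List (String × String)))) : List (String × String) :=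
  (pvAttrs dim).flatMap pvEntriesOf

-- Pre_ excludes dimensions whose attributes produce two alias slots with the same normalized key but different resolved
-- values: there A's answer is the accident of dict last-writer-wins while B returns the first match, and neither is specified.
def Pre_resolve_hierarchy_source_attribute_id_py (level : List (String × String)) (dim : List (String × List (List (String × String)))) : Prop :=
  ∀ p ∈ pvEntries dim, ∀ q ∈ pvEntries dim, p.1 = q.1 → p.2 = q.2
instance (level : List (String × String)) (dim : List (String × List (List (String × String)))) : Decidable (Pre_resolve_hierarchy_source_attribute_id_py level dim) := by unfold Pre_resolve_hierarchy_source_attribute_id_py; infer_instance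

def pvWitness_resolve_hierarchy_source_attribute_id_py : (List (String × String)) × (List (String × List (List (String × String)))) :=
  ([("name", "city")], [("attributes", [[("name", "City")]])])

def Spec_resolve_hierarchy_source_attribute_id_py (level : List (String × String)) (dim : List (String × List (List (String × String)))) (out : Option String) : Prop := out = resolve_hierarchy_source_attribute_id_py_alt level dim
instance (level : List (String × String)) (dim : List (String × List (List (String × String)))) (out : Option String) : Decidable (Spec_resolve_hierarchy_source_attribute_id_py level dim out) := by unfold Spec_resolve_hierarchy_source_attribute_id_py; infer_instance

-- ===== CLAIM (what is proved, stated in full; the proofs are below) =====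
def Claim_equal_resolve_hierarchy_source_attribute_id_py : Prop := ∀ (level : List (String × String)) (dim : List (String × List (List (String × String)))), Dom_resolve_hierarchy_source_attribute_id_py level dim → Pre_resolve_hierarchy_source_attribute_id_py level dim → Spec_resolve_hierarchy_source_attribute_id_py level dim (resolve_hierarchy_source_attribute_id_py level dim)

-- ===== LEMMAS AND PROOFS =====

-- A's alias step inserts exactly the entry pairs of the attribute, in order
theorem pvAliasStep_eq_foldl (al : PySem.Dict String String) (attr : List (String × String)) :
    pvAliasStep al attr = (pvEntriesOf attr).foldl (fun d p => d.insert p.1 p.2) al := by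
  unfold pvAliasStep pvEntriesOf
  split_ifs <;> simp

-- folding the alias step = folding plain insertions over the entries
theorem pvFoldAlias_eq (attrs : List (List (String × String))) (d : PySem.Dict String String) :
    attrs.foldl pvAliasStep d
      = (attrs.flatMap pvEntriesOf).foldl (fun d p => d.insert p.1 p.2) d := by
  induction attrs generalizing d with
  | nil => rfl
  | cons a rest ih =>
    simp only [List.foldl_cons, List.flatMap_cons, List.foldl_append]
    rw [pvAliasStep_eq_foldl]
    exact ih _

theorem pvAliases_eq_foldl (dim : List (String × List (List (String × String)))) :
    pvAliases dim = (pvEntries dim).foldl (fun d p => d.insert p.1 p.2) PySem.Dict.empty :=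
  pvFoldAlias_eq _ _

-- looking up an insert-fold lands on a pair of the list (or was there before)
theorem pvLookup_mem (E : List (String × String)) (d : PySem.Dict String String) (k : String) (v : String)
    (h : (E.foldl (fun d p => d.insert p.1 p.2) d).get? k = some v) :
    (k, v) ∈ E ∨ d.get? k = some v := by
  induction E generalizing d with
  | nil => exact Or.inr h
  | cons p rest ih =>
    obtain ⟨p1, p2⟩ := p
    simp only [List.foldl_cons] at h
    rcases ih _ h with h1 | h1
    · exact Or.inl (List.mem_cons_of_mem _ h1)
    · rw [PySem.Dict.get?_insert] at h1
      by_cases hk : k = p1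
      · rw [if_pos hk] at h1
        injection h1 with h1
        exact Or.inl (by rw [hk, ← h1]; exact List.mem_cons_self)
      · rw [if_neg hk] at h1
        exact Or.inr h1

-- a lookup that comes back empty means no pair of the list carries that key
theorem pvLookup_none (E : List (String × String)) (d : PySem.Dict String String) (k : String)
    (h : (E.foldl (fun d p => d.insert p.1 p.2) d).get? k = none) :
    (∀ v, (k, v) ∉ E) ∧ d.get? k = none := by
  induction E generalizing d with
  | nil => exact ⟨fun v hv => (by cases hv), h⟩
  | cons p rest ih =>
    obtain ⟨p1, p2⟩ := p
    simp only [List.foldl_cons] at h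
    obtain ⟨h1, h2⟩ := ih _ h
    rw [PySem.Dict.get?_insert] at h2
    by_cases hk : k = p1
    · rw [if_pos hk] at h2; cases h2
    · rw [if_neg hk] at h2
      refine ⟨fun v hv => ?_, h2⟩
      rcases List.mem_cons.mp hv with hv | hv
      · exact hk (congrArg Prod.fst hv)
      · exact h1 v hv

-- every alias value is a nonempty string
theorem pvEntries_val_ne (dim : List (String × List (List (String × String)))) (k v : String)
    (h : (k, v) ∈ pvEntries dim) : v ≠ "" := by
  unfold pvEntries at h
  rw [List.mem_flatMap] at h
  obtain ⟨attr, _, hm⟩ := h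
  unfold pvEntriesOf at hm
  split_ifs at hm <;>
    simp only [List.mem_append, List.mem_singleton, List.not_mem_nil, or_false,
      false_or, Prod.mk.injEq] at hm <;>
    first
      | (rcases hm with ⟨_, hv⟩ | ⟨_, hv⟩ <;> subst hv <;> simp_all [pvTruthy])
      | (obtain ⟨_, hv⟩ := hm; subst hv; simp_all [pvTruthy])
      | exact hm

-- B's scan returns none exactly when the dimension has no entry with that key
theorem pvFindB_none (key : String) (attrs : List (List (String × String)))
    (h : pvFindB key attrs = none) :
    ∀ v, (key, v) ∉ attrs.flatMap pvEntriesOf := by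
  induction attrs with
  | nil => simp
  | cons attr rest ih =>
    intro v hv
    unfold pvFindB at h
    split_ifs at h with hc
    simp only [Bool.or_eq_true, Bool.and_eq_true, beq_iff_eq, not_or, not_and] at hc
    simp only [List.flatMap_cons, List.mem_append] at hv
    rcases hv with hm | hm
    · unfold pvEntriesOf at hm
      by_cases hn : pvTruthy (pvAn attr) = true <;>
      by_cases hs : pvTruthy (pvSc attr) = true <;>
        simp_all [Prod.mk.injEq] <;>
        rcases hm with ⟨hk, _⟩ | ⟨hk, _⟩ <;>
        simp_all
    · exact ih h v hm

-- B's scan hit is one of the dimension's entries with that key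
theorem pvFindB_some (key : String) (attrs : List (List (String × String))) (v : String)
    (h : pvFindB key attrs = some v) :
    (key, v) ∈ attrs.flatMap pvEntriesOf := by
  induction attrs with
  | nil => cases h
  | cons attr rest ih =>
    unfold pvFindB at h
    split_ifs at h with hc hn
    · injection h with hv
      simp only [Bool.or_eq_true, Bool.and_eq_true, beq_iff_eq] at hc
      simp only [List.flatMap_cons, List.mem_append]
      refine Or.inl ?_
      unfold pvEntriesOf
      by_cases hs : pvTruthy (pvSc attr) = true <;>
        rcases hc with ⟨h1, h2⟩ | ⟨h1, h2⟩ <;> simp_all [Prod.mk.injEq]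
    · injection h with hv
      simp only [Bool.or_eq_true, Bool.and_eq_true, beq_iff_eq] at hc
      simp only [List.flatMap_cons, List.mem_append]
      refine Or.inl ?_
      unfold pvEntriesOf
      by_cases hs : pvTruthy (pvSc attr) = true <;>
        rcases hc with ⟨h1, h2⟩ | ⟨h1, h2⟩ <;> simp_all [Prod.mk.injEq]
    · simp only [List.flatMap_cons, List.mem_append]
      exact Or.inr (ih h)

-- under Pre_, the dict lookup A performs agrees with B's first-match scan
theorem pvGet_eq_find (level : List (String × String)) (dim : List (String × List (List (String × String))))
    (hpre : Pre_resolve_hierarchy_source_attribute_id_py level dim) (key : String) :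
    (pvAliases dim).get? key = pvFindB key (pvAttrs dim) := by
  rw [pvAliases_eq_foldl]
  cases hf : pvFindB key (pvAttrs dim) with
  | none =>
    cases hg : ((pvEntries dim).foldl (fun d p => d.insert p.1 p.2) PySem.Dict.empty).get? key with
    | none => rfl
    | some v =>
      rcases pvLookup_mem _ _ _ _ hg with hm | hm
      · exact absurd (by simpa [pvEntries] using hm) (pvFindB_none key (pvAttrs dim) hf v)
      · simp [PySem.Dict.get?_empty] at hm
  | some v =>
    have hmem : (key, v) ∈ pvEntries dim := by simpa [pvEntries] using pvFindB_some key _ v hf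
    cases hg : ((pvEntries dim).foldl (fun d p => d.insert p.1 p.2) PySem.Dict.empty).get? key with
    | none => exact absurd hmem ((pvLookup_none _ _ _ hg).1 v)
    | some w =>
      rcases pvLookup_mem _ _ _ _ hg with hm | hm
      · exact congrArg some (hpre _ hm _ hmem rfl)
      · simp [PySem.Dict.get?_empty] at hm

-- the two candidate loops agree field by field
theorem pvLoops_eq (level : List (String × String)) (dim : List (String × List (List (String × String))))
    (hpre : Pre_resolve_hierarchy_source_attribute_id_py level dim) (fields : List String) :
    pvLoopA (pvAliases dim) (fields.map (fun f => (PySem.Dict.mk level).get? f))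
      = pvLoopB (pvAttrs dim) level fields := by
  induction fields with
  | nil => rfl
  | cons f rest ih =>
    simp only [List.map_cons]
    unfold pvLoopA pvLoopB
    by_cases hc : pvTruthy ((PySem.Dict.mk level).get? f) = true
    · rw [if_pos hc, if_pos hc]
      rw [pvGet_eq_find level dim hpre]
      cases hf : pvFindB (pvNorm (((PySem.Dict.mk level).get? f).getD "")) (pvAttrs dim) with
      | none => simpa [pvTruthy] using ih
      | some v =>
        have hv : v ≠ "" :=
          pvEntries_val_ne dim _ v (by simpa [pvEntries] using pvFindB_some _ _ _ hf)
        simp [pvTruthy, hv]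
    · rw [if_neg hc, if_neg hc]
      exact ih

-- ===== VERDICT (by name: the statement is the Claim_ definition above) =====
theorem resolve_hierarchy_source_attribute_id_py_spec : Claim_equal_resolve_hierarchy_source_attribute_id_py := by
  intro level dim _ hpre
  unfold Spec_resolve_hierarchy_source_attribute_id_py
  unfold resolve_hierarchy_source_attribute_id_py resolve_hierarchy_source_attribute_id_py_alt
  simpa using pvLoops_eq level dim hpre ["source_attribute_id", "source_column", "name"]
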